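-- pv_equiv track=rewrite | github.com/digitalthreadai/partclassifier | src/shared.py | rotate_manufacturers
-- ===== SOURCE A (Python) =====
-- from collections import defaultdict
--
-- def rotate_manufacturers(parts: list[dict]) -> list[dict]:
--     """Reorder parts so same-manufacturer parts aren't adjacent.
--
--     Round-robin interleave by manufacturer name to space out requests
--     to the same site (reduces bot detection risk).
--     """
--     buckets: dict[str, list[dict]] = defaultdict(list)
--     for p in parts:
--         mfg = str(p.get("Manufacturer Name") or "").strip().upper()
--         buckets[mfg].append(p)
--
--     # Sort buckets largest-first so the most common manufacturer gets spread widest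
--     sorted_buckets = sorted(buckets.values(), key=len, reverse=True)
--
--     rotated: list[dict] = []
--     while any(sorted_buckets):
--         for bucket in sorted_buckets:
--             if bucket:
--                 rotated.append(bucket.pop(0))
--         sorted_buckets = [b for b in sorted_buckets if b]
--
--     return rotated
-- ===== SOURCE B (Python) =====
-- from collections import defaultdict
--
-- def rotate_manufacturers(parts: list[dict]) -> list[dict]:
--     """Round-robin interleave by manufacturer, via index pointers over
--     length-sorted buckets (no pop(0), no per-round refiltering)."""
--     buckets: dict[str, list[dict]] = defaultdict(list)
--     for p in parts:
--         mfg = str(p.get("Manufacturer Name") or "").strip().upper()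
--         buckets[mfg].append(p)
--
--     bs = sorted(buckets.values(), key=len, reverse=True)
--     maxlen = len(bs[0]) if bs else 0
--
--     rotated: list[dict] = []
--     for r in range(maxlen):
--         for b in bs:
--             if len(b) <= r:
--                 break  # lengths are non-increasing: the rest are too short
--             rotated.append(b[r])
--     return rotated
-- ===== Notes on version B (the rewrite author's own statement) =====
-- stated objective: alternative
-- what changed: Replaces A's destructive round loop (pop(0) from every non-empty bucket, then refilter, repeated until all buckets drain) with index pointers: round r reads element r of each bucket in the length-sorted prefix of buckets longer than r, breaking at the first too-short bucket; no list mutation or refiltering.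
import Mathlib
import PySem

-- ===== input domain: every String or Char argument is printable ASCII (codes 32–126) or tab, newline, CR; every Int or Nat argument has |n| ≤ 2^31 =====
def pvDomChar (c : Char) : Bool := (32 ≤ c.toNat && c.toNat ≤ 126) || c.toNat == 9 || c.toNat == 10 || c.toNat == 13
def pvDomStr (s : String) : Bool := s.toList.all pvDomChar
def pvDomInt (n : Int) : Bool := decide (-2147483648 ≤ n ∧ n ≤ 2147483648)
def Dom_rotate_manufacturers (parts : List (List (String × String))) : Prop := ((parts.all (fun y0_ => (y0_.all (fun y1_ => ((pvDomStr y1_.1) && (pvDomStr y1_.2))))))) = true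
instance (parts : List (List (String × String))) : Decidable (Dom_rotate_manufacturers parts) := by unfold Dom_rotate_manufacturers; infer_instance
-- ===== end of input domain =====

-- B replaces A's pop(0)/refilter rounds by index pointers over the length-sorted buckets (objective: alternative).

-- ===== PORT A =====
-- shared first phase (identical in both Pythons): bucket by normalised manufacturer, sort largest-first
def pvSortedBuckets (parts : List (List (String × String))) :
    List (List (List (String × String))) :=
  let buckets := parts.foldl
    (fun d p =>
      let mfg := PySem.Str.upper (PySem.Str.strip
        (((PySem.Dict.mk p).get? "Manufacturer Name").getD ""))
      PySem.Dict.modify d mfg [] (fun b => b ++ [p]))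
    PySem.Dict.empty
  PySem.List.sorted (PySem.Dict.values buckets) (fun b => b.length) true

-- the body of A's 'for bucket in sorted_buckets: if bucket: rotated.append(bucket.pop(0))'
def pvPopStep (st : List (List (String × String)) × List (List (List (String × String))))
    (b : List (List (String × String))) :
    List (List (String × String)) × List (List (List (String × String))) :=
  match b with
  | [] => (st.1, st.2 ++ [([] : List (List (String × String)))])
  | x :: tl => (st.1 ++ [x], st.2 ++ [tl])

-- what one pass of pops computes (cited by the port's termination proof)
theorem pvPopFold (bs : List (List (List (String × String))))
    (rot : List (List (String × String))) (acc : List (List (List (String × String)))) :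
    bs.foldl pvPopStep (rot, acc)
      = (rot ++ bs.filterMap List.head?, acc ++ bs.map List.tail) := by
  induction bs generalizing rot acc with
  | nil => simp
  | cons b t ih => cases b <;> simp [pvPopStep, ih]

theorem pvSublist_sum_le {l1 l2 : List Nat} (h : l1.Sublist l2) : l1.sum ≤ l2.sum := by
  induction h with
  | slnil => simp
  | cons a _ ih => simp only [List.sum_cons]; omega
  | cons₂ a _ ih => simp only [List.sum_cons]; omega

theorem pvTailSum_le (bs : List (List (List (String × String)))) :
    (((bs.map List.tail).map List.length).sum) ≤ ((bs.map List.length).sum) := by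
  induction bs with
  | nil => simp
  | cons c u ih =>
    have : c.tail.length ≤ c.length := by cases c <;> simp
    simp only [List.map_cons, List.sum_cons]
    omega

theorem pvTailSum_lt (bs : List (List (List (String × String))))
    (h : bs.any (fun b => !b.isEmpty) = true) :
    (((bs.map List.tail).map List.length).sum) < ((bs.map List.length).sum) := by
  induction bs with
  | nil => simp at h
  | cons b t ih =>
    simp only [List.any_cons, Bool.or_eq_true] at h
    rcases h with h | h
    · have h2 : b.tail.length < b.length := by cases b <;> simp_all
      have h3 := pvTailSum_le t
      simp only [List.map_cons, List.sum_cons]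
      omega
    · have h2 := ih h
      have h3 : b.tail.length ≤ b.length := by cases b <;> simp
      simp only [List.map_cons, List.sum_cons]
      omega

-- termination measure for A's while-loop, cited by the port
theorem pvSumTail_lt (bs : List (List (List (String × String))))
    (h : bs.any (fun b => !b.isEmpty) = true) :
    ((((bs.map List.tail).filter (fun b => !b.isEmpty)).map List.length).sum)
      < ((bs.map List.length).sum) := by
  have h1 : ((((bs.map List.tail).filter (fun b => !b.isEmpty)).map List.length).sum)
      ≤ (((bs.map List.tail).map List.length).sum) :=
    pvSublist_sum_le (List.Sublist.map List.length List.filter_sublist)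
  exact lt_of_le_of_lt h1 (pvTailSum_lt bs h)

-- the 'while any(sorted_buckets):' loop of A, transliterated
def rotate_manufacturersLoop (rotated : List (List (String × String)))
    (bs : List (List (List (String × String)))) : List (List (String × String)) :=
  if h : bs.any (fun b => !b.isEmpty) = true then
    let st := bs.foldl pvPopStep (rotated, [])
    -- sorted_buckets = [b for b in sorted_buckets if b]
    rotate_manufacturersLoop st.1 (st.2.filter (fun b => !b.isEmpty))
  else rotated
termination_by (bs.map List.length).sum
decreasing_by
  simp only [List.foldl_attach]
  simp only [pvPopFold, List.nil_append]
  exact pvSumTail_lt bs h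

def rotate_manufacturers (parts : List (List (String × String))) :
    List (List (String × String)) :=
  rotate_manufacturersLoop [] (pvSortedBuckets parts)

-- ===== PORT B =====
-- maxlen = len(bs[0]) if bs else 0
def pvMaxLen (bs : List (List (List (String × String)))) : Nat :=
  match bs with
  | [] => 0
  | b :: _ => b.length

def rotate_manufacturers_alt (parts : List (List (String × String))) :
    List (List (String × String)) :=
  let bs := pvSortedBuckets parts
  -- for r in range(maxlen): for b in bs: if len(b) <= r: break; rotated.append(b[r])
  (List.range (pvMaxLen bs)).foldl
    (fun rotated r =>
      rotated ++ (bs.takeWhile (fun b => decide (r < b.length))).map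
        (fun b => b.getD r []))
    []

-- ===== PRECONDITION & SPEC =====
def Spec_rotate_manufacturers (parts : List (List (String × String))) (out : List (List (String × String))) : Prop := out = rotate_manufacturers_alt parts
instance (parts : List (List (String × String))) (out : List (List (String × String))) : Decidable (Spec_rotate_manufacturers parts out) := by unfold Spec_rotate_manufacturers; infer_instance

-- ===== CLAIM (what is proved, stated in full; the proofs are below) =====
def Claim_equal_rotate_manufacturers : Prop := ∀ (parts : List (List (String × String))), Dom_rotate_manufacturers parts → Spec_rotate_manufacturers parts (rotate_manufacturers parts)

-- ===== LEMMAS AND PROOFS =====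

-- row r of the round-robin output, and the concatenation of all rows
def pvRow (bs : List (List (List (String × String)))) (r : Nat) :
    List (List (String × String)) :=
  (bs.takeWhile (fun b => decide (r < b.length))).map (fun b => b.getD r [])

def pvG (bs : List (List (List (String × String)))) : List (List (String × String)) :=
  (List.range (pvMaxLen bs)).flatMap (pvRow bs)

-- lengths are non-increasing along bs
def pvNonInc (bs : List (List (List (String × String)))) : Prop :=
  bs.Pairwise (fun a b => b.length ≤ a.length)

-- on a non-increasing list, a length-monotone filter is a takeWhile
theorem pvFilter_eq_takeWhile (p : List (List (String × String)) → Bool)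
    (hp : ∀ a b, b.length ≤ a.length → p a = false → p b = false)
    (bs : List (List (List (String × String)))) (hw : pvNonInc bs) :
    bs.filter p = bs.takeWhile p := by
  induction bs with
  | nil => rfl
  | cons b t ih =>
    rcases List.pairwise_cons.mp hw with ⟨hb, ht⟩
    by_cases hpb : p b = true
    · simp [hpb, ih ht]
    · have hpb' : p b = false := by simpa using hpb
      have : t.filter p = [] := by
        apply List.filter_eq_nil_iff.mpr
        intro x hx
        simp [hp b x (hb x hx) hpb']
      simp [hpb', this]

theorem pvGetD_tail (b : List (List (String × String))) (r : Nat) :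
    b.tail.getD r [] = b.getD (r + 1) [] := by
  cases b <;> simp

theorem pvTailNotEmpty_eq (b : List (List (String × String))) :
    (!b.tail.isEmpty) = decide (1 < b.length) := by
  cases b with
  | nil => simp
  | cons x t => cases t <;> simp

theorem pvQ_mono (r : Nat) (a b : List (List (String × String)))
    (h : b.length ≤ a.length) (ha : decide (r < a.length) = false) :
    decide (r < b.length) = false := by
  simp at ha ⊢; omega

theorem pvFilterMap_head (bs : List (List (List (String × String)))) :
    bs.filterMap List.head?
      = (bs.filter (fun b => decide (0 < b.length))).map (fun b => b.getD 0 []) := by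
  induction bs with
  | nil => rfl
  | cons b t ih => cases b <;> simp [ih]

theorem pvTakeWhile_takeWhile {α : Type} (p q : α → Bool) (l : List α) :
    (l.takeWhile q).takeWhile p = l.takeWhile (fun a => p a && q a) := by
  induction l with
  | nil => rfl
  | cons a t ih =>
    by_cases hq : q a = true
    · by_cases hp : p a = true
      · simp [hq, hp, ih]
      · simp only [Bool.not_eq_true] at hp
        simp [hq, hp]
    · simp only [Bool.not_eq_true] at hq
      simp [hq]

theorem pvTail_pred (r : Nat) (b : List (List (String × String))) :
    (decide (r < b.tail.length) && decide (1 < b.length)) = decide (r + 1 < b.length) := by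
  cases b with
  | nil => simp
  | cons x t =>
    by_cases h : r < t.length
    · have h2 : r + 1 < t.length + 1 := by omega
      simp [h, h2]
      omega
    · have h2 : ¬ (r + 1 < t.length + 1) := by omega
      simp [h, h2]

-- the popped-and-filtered buckets are the tails of the prefix of length > 1
theorem pvBs'_eq (bs : List (List (List (String × String)))) (hw : pvNonInc bs) :
    (bs.map List.tail).filter (fun b => !b.isEmpty)
      = (bs.takeWhile (fun b => decide (1 < b.length))).map List.tail := by
  rw [List.filter_map]
  have h1 : ((fun b => !b.isEmpty) ∘ List.tail :
      List (List (String × String)) → Bool) = fun b => decide (1 < b.length) := by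
    funext b; exact pvTailNotEmpty_eq b
  rw [h1, pvFilter_eq_takeWhile _ (pvQ_mono 1) bs hw]

-- row r+1 of bs is row r of the popped-and-filtered buckets
theorem pvRow_shift (bs : List (List (List (String × String)))) (hw : pvNonInc bs) (r : Nat) :
    pvRow ((bs.map List.tail).filter (fun b => !b.isEmpty)) r = pvRow bs (r + 1) := by
  rw [pvBs'_eq bs hw]
  unfold pvRow
  rw [List.takeWhile_map, pvTakeWhile_takeWhile, List.map_map]
  have hpred : (fun b => ((fun b => decide (r < b.length)) ∘ List.tail) b
        && decide (1 < b.length)) = (fun b : List (List (String × String)) =>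
        decide (r + 1 < b.length)) := by
    funext b; exact pvTail_pred r b
  rw [hpred]
  apply List.map_congr_left
  intro b _
  exact pvGetD_tail b r

-- A's loop produces the concatenation of the rows
theorem pvMain (n : Nat) : ∀ (bs : List (List (List (String × String)))),
    pvNonInc bs → pvMaxLen bs = n →
    ∀ rot, rotate_manufacturersLoop rot bs = rot ++ pvG bs := by
  induction n with
  | zero =>
    intro bs hw hm rot
    have hall : bs.any (fun b => !b.isEmpty) = false := by
      rw [List.any_eq_false]
      cases bs with
      | nil => intro x hx; simp at hx
      | cons b t =>
        intro x hx
        rcases List.pairwise_cons.mp hw with ⟨hb, _⟩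
        have hb0 : b.length = 0 := by simpa [pvMaxLen] using hm
        have hx0 : x.length = 0 := by
          rcases List.mem_cons.mp hx with rfl | hx
          · exact hb0
          · have := hb x hx
            omega
        simp [List.length_eq_zero_iff.mp hx0]
    unfold rotate_manufacturersLoop
    rw [dif_neg (by simp [hall])]
    simp [pvG, hm]
  | succ n ih =>
    intro bs hw hm rot
    cases bs with
    | nil => simp [pvMaxLen] at hm
    | cons b t =>
      have hb : b.length = n + 1 := by simpa [pvMaxLen] using hm
      have hany : (b :: t).any (fun b => !b.isEmpty) = true := by
        cases b
        · simp at hb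
        · simp
      unfold rotate_manufacturersLoop
      rw [dif_pos hany]
      simp only [pvPopFold, List.nil_append]
      -- the new bucket list, its invariants
      have hw' : pvNonInc (((b :: t).map List.tail).filter (fun b => !b.isEmpty)) := by
        rw [pvBs'_eq _ hw]
        apply List.pairwise_map.mpr
        refine List.Pairwise.imp ?_
          (List.Pairwise.sublist (List.takeWhile_sublist _) hw)
        intro x y hxy
        simp only [List.length_tail]
        exact Nat.sub_le_sub_right hxy 1
      have hm' : pvMaxLen (((b :: t).map List.tail).filter (fun b => !b.isEmpty)) = n := by
        rw [pvBs'_eq _ hw]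
        cases n with
        | zero =>
          have : decide (1 < b.length) = false := by simp; omega
          simp [this, pvMaxLen]
        | succ m =>
          have : decide (1 < b.length) = true := by simp; omega
          simp [this, pvMaxLen, List.length_tail]
          omega
      rw [ih _ hw' hm']
      -- peel row 0 off pvG (b :: t)
      have hG : pvG (b :: t)
          = pvRow (b :: t) 0 ++ pvG (((b :: t).map List.tail).filter (fun b => !b.isEmpty)) := by
        unfold pvG
        rw [hm, hm', List.range_succ_eq_map, List.flatMap_cons, List.flatMap_map]
        congr 1
        apply List.flatMap_congr  -- pointwise equality of the remaining rows
        intro r _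
        exact (pvRow_shift _ hw r).symm
      have hFM : (b :: t).filterMap List.head? = pvRow (b :: t) 0 := by
        rw [pvFilterMap_head]
        unfold pvRow
        rw [pvFilter_eq_takeWhile _ (pvQ_mono 0) _ hw]
      rw [hFM, hG, List.append_assoc]

-- ===== VERDICT (by name: the statement is the Claim_ definition above) =====
theorem rotate_manufacturers_spec : Claim_equal_rotate_manufacturers := by
  intro parts _
  unfold Spec_rotate_manufacturers rotate_manufacturers rotate_manufacturers_alt
  have hw : pvNonInc (pvSortedBuckets parts) := by
    unfold pvSortedBuckets pvNonInc
    exact PySem.List.sorted_pairwise_rev _ _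
  rw [pvMain (pvMaxLen (pvSortedBuckets parts)) (pvSortedBuckets parts) hw rfl []]
  rw [PySem.List.foldl_append_eq_flatMap]
  unfold pvG pvRow
  rfl
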